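-- pv_equiv track=rewrite | github.com/denisangel2k2/UBB | Year 1/Semester 1/Fundamentals of Programming/LAB 13/lab13.py | back_i
-- ===== SOURCE A (Python) =====
-- def common_digit(a,b):
--     if a==0 and b==0:
--         return True
--     else:
--         if a==0:
--             a, b= b, a
--         while a!=0:
--             n=b
--
--             if a%10==n%10:
--                 return True
--
--             while n!=0:
--                 if a%10==n%10:
--                     return True
--                 n//=10
--             a//=10
--
--         return False
--
-- def valid(l):
--     for i in range(len(l)-1):
--         if common_digit(l[i], l[i+1])==False:
--             return False
--
--     if l!=sorted(l):
--         return False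
--
--     '''if len(l)<2:
--         for i in range(len(l)-1):
--             if l[i]==l[len(l)-1]:
--                 return False'''
--
--
--     for i in range(1,len(l)):
--         if l[i-1]>l[i]:
--             return False
--
--     return True
--
-- def back_i(a):
--     all_lists=[]
--     for i in range(len(a)+1):
--         for j in range(i,len(a)+1):
--             if valid(a[i:j]):
--                 if len(a[i:j])>2:
--                     all_lists.append(a[i:j])
--     return all_lists
-- ===== SOURCE B (Python) =====
-- def back_i(a):
--     def digits(x):
--         if x == 0:
--             return {0}
--         if x < 0:
--             x = -x
--         s = set()
--         while x:
--             s.add(x % 10)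
--             x //= 10
--         return s
--
--     n = len(a)
--     ds = [digits(x) for x in a]
--     good = [a[k] <= a[k + 1] and bool(ds[k] & ds[k + 1]) for k in range(n - 1)]
--     res = []
--     for i in range(n):
--         j = i + 1
--         while j < n and good[j - 1]:
--             j += 1
--             if j - i > 2:
--                 res.append(a[i:j])
--     return res
-- ===== Notes on version B (the rewrite author's own statement) =====
-- stated objective: faster
-- what changed: A revalidates every contiguous slice a[i:j] from scratch (adjacent common-digit scan plus a sort per slice); B precomputes one boolean per adjacent pair (sorted order and a shared decimal digit, via digit sets built once per element) and, for each start index, extends the window while the flags hold, breaking at the first failure (intended asymptotic speed-up; a timing run could not measure A at the largest sizes since A does not finish on random inputs with negative elements).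
-- outside the precondition, e.g. on back_i([-5, 3, 33]): A does not finish within the time limit, B returns []; on back_i([-2147483647, -65536, 9]): A returns [[-2147483647, -65536, 9]], B returns []; on back_i([-1]): A returns [], B returns []
import Mathlib
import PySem

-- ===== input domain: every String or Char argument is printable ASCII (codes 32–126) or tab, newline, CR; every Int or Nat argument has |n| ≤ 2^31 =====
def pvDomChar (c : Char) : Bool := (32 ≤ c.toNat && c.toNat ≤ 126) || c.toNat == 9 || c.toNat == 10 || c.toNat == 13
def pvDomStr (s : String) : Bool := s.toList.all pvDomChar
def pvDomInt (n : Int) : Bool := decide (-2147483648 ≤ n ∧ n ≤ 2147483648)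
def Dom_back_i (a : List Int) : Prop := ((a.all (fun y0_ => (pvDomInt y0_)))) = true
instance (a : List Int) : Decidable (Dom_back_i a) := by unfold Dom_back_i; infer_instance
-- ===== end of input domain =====

-- B precomputes each adjacent pair's "ordered + common digit" flag once and extends every start
-- while the flags hold, breaking at the first failure, instead of A's revalidation of every
-- contiguous slice from scratch; objective: faster (intended asymptotic speed-up; the timing
-- run could not confirm a ratio because A does not finish on its random large inputs).

-- ===== PORT A =====
-- The fuel parameters only make Python's while-loops total; with the fuel shown the loops are
-- exact wherever the Python loops terminate (in particular on the nonnegative inputs of Pre_).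

def cdInner : Nat → Int → Int → Bool
  | 0, _, _ => false
  | f+1, a10, n =>
    if n = 0 then false
    else if a10 = PySem.Int.mod n 10 then true
    else cdInner f a10 (PySem.Int.floordiv n 10)

def cdOuter : Nat → Int → Int → Bool
  | 0, _, _ => false
  | f+1, x, b =>
    if x = 0 then false
    else if PySem.Int.mod x 10 = PySem.Int.mod b 10 then true
    else if cdInner (b.natAbs + 1) (PySem.Int.mod x 10) b then true
    else cdOuter f (PySem.Int.floordiv x 10) b

def commonDigit (a b : Int) : Bool :=
  if a = 0 ∧ b = 0 then true
  else
    let p := if a = 0 then (b, a) else (a, b)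
    cdOuter (p.1.natAbs + 1) p.1 p.2

def valid (l : List Int) : Bool :=
  if ((List.range (l.length - 1)).all fun i => commonDigit (l.getD i 0) (l.getD (i+1) 0)) = false then false
  else if l ≠ PySem.List.sorted l (fun x => x) then false
  else if ¬ ((List.range' 1 (l.length - 1)).all fun i => decide (l.getD (i-1) 0 ≤ l.getD i 0)) then false
  else true

def back_i (a : List Int) : List (List Int) :=
  (List.range (a.length + 1)).foldl (fun (acc : List (List Int)) (i : Nat) =>
    (List.range' i (a.length + 1 - i)).foldl (fun (acc : List (List Int)) (j : Nat) =>
      if valid (PySem.List.slice a (some (i : Int)) (some (j : Int))) then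
        if (PySem.List.slice a (some (i : Int)) (some (j : Int))).length > 2 then
          acc ++ [PySem.List.slice a (some (i : Int)) (some (j : Int))]
        else acc
      else acc) acc) []

-- ===== PORT B =====
-- digit-set loop of Source B (fuel makes the while-loop total; exact wherever it terminates)

def digitsB : Nat → Int → PySem.Set Int → PySem.Set Int
  | 0, _, s => s
  | f+1, x, s =>
    if x ≠ 0 then digitsB f (PySem.Int.floordiv x 10) (PySem.Set.add s (PySem.Int.mod x 10))
    else s

def digitsOf (x : Int) : PySem.Set Int :=
  if x = 0 then PySem.Set.add PySem.Set.empty 0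
  else
    let x := if x < 0 then -x else x
    digitsB (x.natAbs + 1) x PySem.Set.empty

def extendLoop : Nat → List Int → List Bool → Nat → Nat → List (List Int) → List (List Int)
  | 0, _, _, _, _, acc => acc
  | f+1, a, good, i, j, acc =>
    if j < a.length ∧ good.getD (j-1) false = true then
      let j' := j + 1
      let acc' := if j' - i > 2 then acc ++ [PySem.List.slice a (some (i : Int)) (some (j' : Int))] else acc
      extendLoop f a good i j' acc'
    else acc

def back_i_alt (a : List Int) : List (List Int) :=
  let n := a.length
  let ds := a.map digitsOf
  let good := (List.range (n - 1)).map (fun k =>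
    decide (a.getD k 0 ≤ a.getD (k+1) 0) &&
      !(PySem.Set.inter (ds.getD k []) (ds.getD (k+1) [])).isEmpty)
  (List.range n).foldl (fun (acc : List (List Int)) (i : Nat) => extendLoop n a good i (i+1) acc) []

-- ===== PRECONDITION & SPEC =====
-- Pre_ excludes lists containing a negative element: there A's digit loops walk the infinite
-- 10's-complement digit stream of the negative number (floor division drives it to -1, never 0),
-- so A either diverges (e.g. on [-5, 3, 33]) or returns a value produced by that accidental
-- trailing-9s digit stream; B reads the digits of |x| and returns normally on all lists.
def Pre_back_i (a : List Int) : Prop := ∀ x ∈ a, 0 ≤ x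
instance (a : List Int) : Decidable (Pre_back_i a) := by unfold Pre_back_i; infer_instance
def pvWitness_back_i : List Int := [1, 12, 23, 3]

def Spec_back_i (a : List Int) (out : List (List Int)) : Prop := out = back_i_alt a
instance (a : List Int) (out : List (List Int)) : Decidable (Spec_back_i a out) := by unfold Spec_back_i; infer_instance

-- ===== CLAIM (what is proved, stated in full; the proofs are below) =====
def Claim_equal_back_i : Prop := ∀ (a : List Int), Dom_back_i a → Pre_back_i a → Spec_back_i a (back_i a)

-- ===== LEMMAS AND PROOFS =====

def digA (m : Nat) : List Int :=
  if m = 0 then [] else ((m % 10 : Nat) : Int) :: digA (m / 10)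
decreasing_by exact Nat.div_lt_self (Nat.pos_of_ne_zero (by assumption)) (by norm_num)

def Dset (x : Int) : List Int := if x = 0 then [0] else digA x.toNat

lemma Dset_zero : Dset 0 = [0] := by rw [Dset]; simp

lemma Dset_ne {x : Int} (hx : x ≠ 0) : Dset x = digA x.toNat := if_neg hx

lemma mod_zero_ten : PySem.Int.mod 0 10 = 0 := by decide

lemma digA_zero : digA 0 = [] := by rw [digA]; simp

lemma mod_head_mem (y : Int) (hy : 0 < y) : PySem.Int.mod y 10 ∈ digA y.toNat := by
  have hcast : y = ((y.toNat : Nat) : Int) := (Int.toNat_of_nonneg (by omega)).symm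
  have hmod : PySem.Int.mod y 10 = ((y.toNat % 10 : Nat) : Int) := by
    rw [hcast]; exact_mod_cast PySem.Int.mod_natCast y.toNat 10
  rw [hmod, digA, if_neg (by omega)]
  exact List.mem_cons_self ..

lemma cdInner_eq (f : Nat) (a10 n : Int) (hn : 0 ≤ n) (hf : n < (f : Int)) :
    cdInner f a10 n = decide (a10 ∈ digA n.toNat) := by
  induction f generalizing n with
  | zero => omega
  | succ f ih =>
    rw [cdInner]
    by_cases h0 : n = 0
    · subst h0; simp [digA]
    · have hcast : n = ((n.toNat : Nat) : Int) := (Int.toNat_of_nonneg hn).symm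
      rw [digA]
      have hnz : n.toNat ≠ 0 := by omega
      rw [if_neg hnz]
      have hmod : PySem.Int.mod n 10 = ((n.toNat % 10 : Nat) : Int) := by
        rw [hcast]; exact_mod_cast PySem.Int.mod_natCast n.toNat 10
      have hdiv : PySem.Int.floordiv n 10 = ((n.toNat / 10 : Nat) : Int) := by
        rw [hcast]; exact_mod_cast PySem.Int.floordiv_natCast n.toNat 10
      rw [if_neg h0, hmod, hdiv]
      by_cases heq : a10 = ((n.toNat % 10 : Nat) : Int)
      · simp [heq]
      · rw [if_neg heq, ih _ (by positivity) (by
          have : n.toNat / 10 < n.toNat := Nat.div_lt_self (by omega) (by norm_num)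
          omega)]
        simp only [Int.toNat_natCast, List.mem_cons, decide_eq_decide]
        tauto

lemma cdOuter_eq (f : Nat) (x b : Int) (hx : 0 ≤ x) (hb : 0 ≤ b) (hf : x < (f : Int)) :
    cdOuter f x b = decide (∃ d ∈ digA x.toNat, d = PySem.Int.mod b 10 ∨ d ∈ digA b.toNat) := by
  induction f generalizing x with
  | zero => omega
  | succ f ih =>
    rw [cdOuter]
    by_cases h0 : x = 0
    · subst h0
      have hnil : digA 0 = [] := by rw [digA]; simp
      simp [hnil]
    · have hcast : x = ((x.toNat : Nat) : Int) := (Int.toNat_of_nonneg hx).symm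
      have hnz : x.toNat ≠ 0 := by omega
      have hmod : PySem.Int.mod x 10 = ((x.toNat % 10 : Nat) : Int) := by
        rw [hcast]; exact_mod_cast PySem.Int.mod_natCast x.toNat 10
      have hdiv : PySem.Int.floordiv x 10 = ((x.toNat / 10 : Nat) : Int) := by
        rw [hcast]; exact_mod_cast PySem.Int.floordiv_natCast x.toNat 10
      have hinner := cdInner_eq (b.natAbs + 1) (PySem.Int.mod x 10) b hb (by omega)
      rw [if_neg h0]
      have hdig : digA x.toNat = ((x.toNat % 10 : Nat) : Int) :: digA (x.toNat / 10) := by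
        rw [digA, if_neg hnz]
      rw [hdig]
      by_cases hc1 : PySem.Int.mod x 10 = PySem.Int.mod b 10
      · rw [if_pos hc1]
        have : ∃ d ∈ ((x.toNat % 10 : Nat) : Int) :: digA (x.toNat / 10),
            d = PySem.Int.mod b 10 ∨ d ∈ digA b.toNat :=
          ⟨_, by simp, Or.inl (hmod ▸ hc1)⟩
        exact (decide_eq_true this).symm
      · rw [if_neg hc1, hinner]
        by_cases hc2 : PySem.Int.mod x 10 ∈ digA b.toNat
        · have : ∃ d ∈ ((x.toNat % 10 : Nat) : Int) :: digA (x.toNat / 10),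
              d = PySem.Int.mod b 10 ∨ d ∈ digA b.toNat :=
            ⟨_, by simp, Or.inr (hmod ▸ hc2)⟩
          rw [if_pos (decide_eq_true hc2)]
          exact (decide_eq_true this).symm
        · have harg1 : (0:Int) ≤ PySem.Int.floordiv x 10 := by rw [hdiv]; positivity
          have harg2 : PySem.Int.floordiv x 10 < (f : Int) := by
            have : x.toNat / 10 < x.toNat := Nat.div_lt_self (by omega) (by norm_num)
            rw [hdiv]; omega
          have hstep := ih _ harg1 harg2
          rw [hdiv, Int.toNat_natCast] at hstep
          rw [if_neg (by rw [decide_eq_false hc2]; exact Bool.false_ne_true), hdiv, hstep]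
          simp only [List.mem_cons, decide_eq_decide]
          constructor
          · intro ⟨d, hd, h⟩; exact ⟨d, Or.inr hd, h⟩
          · rintro ⟨d, hd | hd, h⟩
            · exfalso; subst hd
              rcases h with h | h
              · exact hc1 (hmod ▸ h)
              · exact hc2 (hmod ▸ h)
            · exact ⟨d, hd, h⟩

lemma commonDigit_eq (x y : Int) (hx : 0 ≤ x) (hy : 0 ≤ y) :
    commonDigit x y = decide (∃ d ∈ Dset x, d ∈ Dset y) := by
  unfold commonDigit
  by_cases h00 : x = 0 ∧ y = 0
  · rw [if_pos h00]
    obtain ⟨h1, h2⟩ := h00; subst h1; subst h2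
    have : ∃ d ∈ Dset 0, d ∈ Dset 0 := ⟨0, by simp [Dset], by simp [Dset]⟩
    exact (decide_eq_true this).symm
  · rw [if_neg h00]
    by_cases hx0 : x = 0
    · have hy0 : y ≠ 0 := fun h => h00 ⟨hx0, h⟩
      subst hx0
      rw [if_pos rfl]
      dsimp only
      rw [cdOuter_eq _ _ _ hy (by omega) (by omega)]
      simp only [Dset_zero, Dset_ne hy0, mod_zero_ten, Int.toNat_zero, digA_zero]
      simp only [List.mem_singleton, List.not_mem_nil, or_false, decide_eq_decide]
      constructor
      · rintro ⟨d, hd, rfl⟩; exact ⟨0, rfl, hd⟩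
      · rintro ⟨d, rfl, hd⟩; exact ⟨0, hd, rfl⟩
    · rw [if_neg hx0]
      dsimp only
      rw [cdOuter_eq _ _ _ hx hy (by omega)]
      by_cases hy0 : y = 0
      · subst hy0
        simp only [Dset_zero, Dset_ne hx0, mod_zero_ten, Int.toNat_zero, digA_zero]
        simp only [List.mem_singleton, List.not_mem_nil, or_false, decide_eq_decide]
      · simp only [Dset_ne hx0, Dset_ne hy0, decide_eq_decide]
        have hhead := mod_head_mem y (by omega)
        constructor
        · rintro ⟨d, hd, rfl | hmem⟩
          · exact ⟨_, hd, hhead⟩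
          · exact ⟨d, hd, hmem⟩
        · rintro ⟨d, hd, hmem⟩; exact ⟨d, hd, Or.inr hmem⟩

lemma digitsB_mem (f : Nat) (x : Int) (s : PySem.Set Int) (hx : 0 ≤ x) (hf : x < (f : Int)) (d : Int) :
    d ∈ digitsB f x s ↔ d ∈ s ∨ d ∈ digA x.toNat := by
  induction f generalizing x s with
  | zero => omega
  | succ f ih =>
    rw [digitsB]
    by_cases h0 : x = 0
    · subst h0; simp [Int.toNat_zero, digA_zero]
    · have hcast : x = ((x.toNat : Nat) : Int) := (Int.toNat_of_nonneg hx).symm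
      have hmod : PySem.Int.mod x 10 = ((x.toNat % 10 : Nat) : Int) := by
        rw [hcast]; exact_mod_cast PySem.Int.mod_natCast x.toNat 10
      have hdiv : PySem.Int.floordiv x 10 = ((x.toNat / 10 : Nat) : Int) := by
        rw [hcast]; exact_mod_cast PySem.Int.floordiv_natCast x.toNat 10
      rw [if_pos h0]
      have hlt : x.toNat / 10 < x.toNat := Nat.div_lt_self (by omega) (by norm_num)
      rw [ih _ _ (by rw [hdiv]; positivity) (by rw [hdiv]; omega)]
      have hdigx : digA x.toNat = ((x.toNat % 10 : Nat) : Int) :: digA (x.toNat / 10) := by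
        rw [digA, if_neg (show x.toNat ≠ 0 by omega)]
      rw [PySem.Set.mem_add, hdiv, Int.toNat_natCast, hdigx, hmod]
      simp only [List.mem_cons]
      tauto

lemma digitsOf_mem (x : Int) (hx : 0 ≤ x) (d : Int) : d ∈ digitsOf x ↔ d ∈ Dset x := by
  unfold digitsOf
  by_cases h0 : x = 0
  · subst h0
    rw [if_pos rfl, Dset_zero]
    simp [PySem.Set.add, PySem.Set.empty]
  · rw [if_neg h0]
    dsimp only
    rw [if_neg (by omega)]
    rw [digitsB_mem _ _ _ hx (by omega), Dset_ne h0]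
    simp [PySem.Set.empty]

lemma goodFlag_eq (u v : Int) (hu : 0 ≤ u) (hv : 0 ≤ v) :
    (!(PySem.Set.inter (digitsOf u) (digitsOf v)).isEmpty) = commonDigit u v := by
  rw [commonDigit_eq u v hu hv]
  by_cases h : ∃ d ∈ Dset u, d ∈ Dset v
  · obtain ⟨d, h1, h2⟩ := h
    have hmem : d ∈ PySem.Set.inter (digitsOf u) (digitsOf v) := by
      rw [PySem.Set.mem_inter]
      exact ⟨(digitsOf_mem u hu d).mpr h1, (digitsOf_mem v hv d).mpr h2⟩
    have he : (PySem.Set.inter (digitsOf u) (digitsOf v)).isEmpty = false := by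
      rw [List.isEmpty_eq_false_iff_exists_mem]; exact ⟨d, hmem⟩
    have hex : ∃ d ∈ Dset u, d ∈ Dset v := ⟨d, h1, h2⟩
    simp [he, hex]
  · have : (PySem.Set.inter (digitsOf u) (digitsOf v)).isEmpty = true := by
      rw [List.isEmpty_iff, List.eq_nil_iff_forall_not_mem]
      intro d hd
      rw [PySem.Set.mem_inter] at hd
      exact h ⟨d, (digitsOf_mem u hu d).mp hd.1, (digitsOf_mem v hv d).mp hd.2⟩
    simp [this, h]

def P (a : List Int) (k : Nat) : Bool :=
  commonDigit (a.getD k 0) (a.getD (k+1) 0) && decide (a.getD k 0 ≤ a.getD (k+1) 0)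

def allPb (a : List Int) (i j : Nat) : Bool := (List.range' i (j - i - 1)).all (fun k => P a k)

lemma allPb_iff (a : List Int) (i j : Nat) :
    allPb a i j = true ↔ ∀ k, i ≤ k → k + 1 < j → P a k = true := by
  simp only [allPb, List.all_eq_true, List.mem_range'_1]
  constructor
  · intro h k hik hkj; exact h k ⟨hik, by omega⟩
  · intro h k ⟨h1, h2⟩; exact h k h1 (by omega)

def sl (a : List Int) (i j : Nat) : List Int := List.take (j - i) (List.drop i a)

lemma sl_len (a : List Int) (i j : Nat) (hj : j ≤ a.length) (hij : i ≤ j) :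
    (sl a i j).length = j - i := by
  simp only [sl, List.length_take, List.length_drop]; omega

lemma sl_getD (a : List Int) (i j k : Nat) (hj : j ≤ a.length) (hk : k < j - i) :
    (sl a i j).getD k 0 = a.getD (i + k) 0 := by
  have hlen : (sl a i j).length = j - i := sl_len a i j hj (by omega)
  rw [List.getD_eq_getElem _ _ (by omega : k < (sl a i j).length)]
  rw [List.getD_eq_getElem _ _ (show i + k < a.length by omega)]
  simp [sl, List.getElem_take, List.getElem_drop]

lemma pairwise_iff_adj (l : List Int) :
    l.Pairwise (· ≤ ·) ↔ ∀ k, k + 1 < l.length → l.getD k 0 ≤ l.getD (k+1) 0 := by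
  rw [← List.isChain_iff_pairwise, List.isChain_iff_getElem]
  constructor
  · intro h k hk
    have h1 : k < l.length := by omega
    have h2 : k + 1 < l.length := hk
    rw [l.getD_eq_getElem 0 h1, l.getD_eq_getElem 0 h2]
    exact h k (by omega)
  · intro h k hk
    have := h k (by omega)
    rwa [l.getD_eq_getElem 0 (by omega), l.getD_eq_getElem 0 (by omega)] at this

lemma valid_eq_true_iff (l : List Int) :
    valid l = true ↔
      (∀ k, k + 1 < l.length → commonDigit (l.getD k 0) (l.getD (k+1) 0) = true) ∧
        l.Pairwise (· ≤ ·) := by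
  unfold valid
  constructor
  · intro h
    split_ifs at h with h1 h2 h3
    push_neg at h2
    constructor
    · intro k hk
      have := List.all_eq_true.mp (Bool.of_not_eq_false h1) k (List.mem_range.mpr (by omega))
      simpa using this
    · rw [h2]; exact (PySem.List.sorted_pairwise l (fun x => x) : _)
  · intro ⟨h1, h2⟩
    rw [if_neg, if_neg, if_neg]
    · simp only [not_not]
      rw [List.all_eq_true]
      intro k hk
      rw [List.mem_range'_1] at hk
      have hgd := h2
      rw [pairwise_iff_adj] at hgd
      have := hgd (k - 1) (by omega)
      simp only [decide_eq_true_eq]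
      have hke : k - 1 + 1 = k := by omega
      rwa [hke] at this
    · rw [not_not, PySem.List.sorted_eq_self_of_pairwise]
      exact h2
    · rw [Bool.not_eq_false, List.all_eq_true]
      intro k hk
      exact h1 k (by have := List.mem_range.mp hk; omega)

lemma valid_sl (a : List Int) (i j : Nat) (hij : i ≤ j) (hj : j ≤ a.length) :
    valid (sl a i j) = allPb a i j := by
  have hlen : (sl a i j).length = j - i := sl_len a i j hj hij
  have key : valid (sl a i j) = true ↔ allPb a i j = true := by
    rw [valid_eq_true_iff, allPb_iff]
    constructor
    · intro ⟨C1, C2⟩ k hik hkj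
      unfold P
      rw [Bool.and_eq_true, decide_eq_true_eq]
      have hk1 : (k - i) + 1 < (sl a i j).length := by omega
      have e1 : (sl a i j).getD (k - i) 0 = a.getD k 0 := by
        rw [sl_getD a i j (k - i) hj (by omega)]
        congr 1; omega
      have e2 : (sl a i j).getD (k - i + 1) 0 = a.getD (k + 1) 0 := by
        rw [sl_getD a i j (k - i + 1) hj (by omega)]
        congr 1; omega
      have hcd := C1 (k - i) hk1
      rw [e1, e2] at hcd
      have hle := (pairwise_iff_adj _).mp C2 (k - i) hk1
      rw [e1, e2] at hle
      exact ⟨hcd, hle⟩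
    · intro h
      constructor
      · intro k hk
        have hp := h (i + k) (by omega) (by omega)
        unfold P at hp
        rw [Bool.and_eq_true] at hp
        rw [sl_getD a i j k hj (by omega), show k + 1 = (k+1) by rfl,
          sl_getD a i j (k+1) hj (by omega), show i + (k+1) = i + k + 1 by omega]
        exact hp.1
      · rw [pairwise_iff_adj]
        intro k hk
        rw [hlen] at hk
        have hp := h (i + k) (by omega) (by omega)
        unfold P at hp
        rw [Bool.and_eq_true, decide_eq_true_eq] at hp
        rw [sl_getD a i j k hj (by omega), sl_getD a i j (k+1) hj (by omega),
          show i + (k+1) = i + k + 1 by omega]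
        exact hp.2
  cases hB : allPb a i j
  · cases hV : valid (sl a i j)
    · rfl
    · exact absurd (key.mp hV) (by rw [hB]; simp)
  · exact key.mpr hB

def S (a : List Int) (i : Nat) : List (List Int) :=
  ((List.range' i (a.length + 1 - i)).filter (fun j => allPb a i j && decide (j - i > 2))).map
    (fun j => sl a i j)

lemma A_inner (a : List Int) (i : Nat) (acc : List (List Int)) (hi : i ≤ a.length) :
    (List.range' i (a.length + 1 - i)).foldl (fun (acc : List (List Int)) (j : Nat) =>
      if valid (PySem.List.slice a (some (i : Int)) (some (j : Int))) then
        if (PySem.List.slice a (some (i : Int)) (some (j : Int))).length > 2 then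
          acc ++ [PySem.List.slice a (some (i : Int)) (some (j : Int))]
        else acc
      else acc) acc
    = acc ++ S a i := by
  have hbody : ∀ (acc : List (List Int)), ∀ j ∈ List.range' i (a.length + 1 - i),
      (if valid (PySem.List.slice a (some (i : Int)) (some (j : Int))) then
        if (PySem.List.slice a (some (i : Int)) (some (j : Int))).length > 2 then
          acc ++ [PySem.List.slice a (some (i : Int)) (some (j : Int))]
        else acc
      else acc)
      = (if (allPb a i j && decide (j - i > 2)) = true then acc ++ [sl a i j] else acc) := by
    intro acc j hj
    rw [List.mem_range'_1] at hj
    have hjle : j ≤ a.length := by omega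
    rw [PySem.List.slice_natCast]
    show (if valid (sl a i j) = true then
        if (sl a i j).length > 2 then acc ++ [sl a i j] else acc else acc) = _
    rw [valid_sl a i j (by omega) hjle, sl_len a i j hjle (by omega)]
    by_cases h1 : allPb a i j = true
    · by_cases h2 : j - i > 2
      · simp [h1, h2]
      · simp [h1, h2]
    · rw [Bool.not_eq_true] at h1
      simp [h1]
  rw [PySem.List.foldl_congr_mem _ _ _ _ hbody]
  exact PySem.List.foldl_append_if _ _ _ _

def goodP (a : List Int) : List Bool := (List.range (a.length - 1)).map (fun k => P a k)

lemma goodP_getD (a : List Int) (k : Nat) (hk : k < a.length - 1) :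
    (goodP a).getD k false = P a k := PySem.List.getD_map_range _ _ _ _ hk

lemma extend_inv (a : List Int) (i : Nat) (f j : Nat) (acc : List (List Int))
    (hij : i < j) (hjn : j ≤ a.length) (hf : a.length - j ≤ f) (hinv : allPb a i j = true) :
    extendLoop f a (goodP a) i j acc
      = acc ++ ((List.range' (j+1) (a.length - j)).filter
          (fun j' => allPb a i j' && decide (j' - i > 2))).map (fun j' => sl a i j') := by
  induction f generalizing j acc with
  | zero =>
    rw [extendLoop, show a.length - j = 0 by omega]
    simp
  | succ f ih =>
    rw [extendLoop]
    by_cases hcond : j < a.length ∧ (goodP a).getD (j-1) false = true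
    · rw [if_pos hcond]
      obtain ⟨hjlt, hgood⟩ := hcond
      rw [goodP_getD a (j-1) (by omega)] at hgood
      have hinv' : allPb a i (j+1) = true := by
        rw [allPb_iff]
        intro k hik hkj
        by_cases hk : k + 1 < j
        · exact (allPb_iff a i j).mp hinv k hik hk
        · rw [show k = j - 1 by omega]
          exact hgood
      have hrange : List.range' (j+1) (a.length - j)
          = (j+1) :: List.range' (j+2) (a.length - (j+1)) := by
        rw [show a.length - j = (a.length - (j+1)) + 1 by omega, List.range'_succ]
      rw [hrange, List.filter_cons]
      simp only [PySem.List.slice_natCast]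
      show extendLoop f a (goodP a) i (j+1)
          (if j + 1 - i > 2 then acc ++ [sl a i (j+1)] else acc) = _
      by_cases h2 : j + 1 - i > 2
      · rw [if_pos h2, ih (j+1) _ (by omega) (by omega) (by omega) hinv']
        rw [if_pos (by simp [hinv', h2])]
        simp [List.append_assoc]
      · rw [if_neg h2, ih (j+1) _ (by omega) (by omega) (by omega) hinv']
        rw [if_neg (by simp [h2])]
    · rw [if_neg hcond]
      have hfil : ((List.range' (j+1) (a.length - j)).filter
          (fun j' => allPb a i j' && decide (j' - i > 2))) = [] := by
        rw [List.filter_eq_nil_iff]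
        intro j' hj'
        rw [List.mem_range'_1] at hj'
        have hjlt : j < a.length := by omega
        have hgood : (goodP a).getD (j-1) false ≠ true := fun h => hcond ⟨hjlt, h⟩
        rw [goodP_getD a (j-1) (by omega)] at hgood
        have : allPb a i j' ≠ true := by
          intro hall
          exact hgood ((allPb_iff a i j').mp hall (j-1) (by omega) (by omega))
        simp only [Bool.and_eq_true, not_and] at *
        intro h; exact absurd h this
      rw [hfil]
      simp

lemma goodB_eq (a : List Int) (hpre : ∀ x ∈ a, 0 ≤ x) :
    (List.range (a.length - 1)).map (fun k =>
      decide (a.getD k 0 ≤ a.getD (k+1) 0) &&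
        !(PySem.Set.inter ((a.map digitsOf).getD k []) ((a.map digitsOf).getD (k+1) [])).isEmpty)
    = goodP a := by
  unfold goodP
  apply List.map_congr_left
  intro k hk
  rw [List.mem_range] at hk
  have hk1 : k < a.length := by omega
  have hk2 : k + 1 < a.length := by omega
  have e1 : (a.map digitsOf).getD k [] = digitsOf (a.getD k 0) := by
    rw [List.getD_eq_getElem _ _ (by simpa using hk1), List.getElem_map,
      List.getD_eq_getElem _ _ hk1]
  have e2 : (a.map digitsOf).getD (k+1) [] = digitsOf (a.getD (k+1) 0) := by
    rw [List.getD_eq_getElem _ _ (by simpa using hk2), List.getElem_map,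
      List.getD_eq_getElem _ _ hk2]
  have h1 : 0 ≤ a.getD k 0 := by
    rw [List.getD_eq_getElem _ _ hk1]; exact hpre _ (List.getElem_mem hk1)
  have h2 : 0 ≤ a.getD (k+1) 0 := by
    rw [List.getD_eq_getElem _ _ hk2]; exact hpre _ (List.getElem_mem hk2)
  rw [e1, e2, goodFlag_eq _ _ h1 h2, P, Bool.and_comm]

lemma S_shift (a : List Int) (i : Nat) (hi : i < a.length) :
    S a i = ((List.range' (i+2) (a.length - (i+1))).filter
        (fun j' => allPb a i j' && decide (j' - i > 2))).map (fun j' => sl a i j') := by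
  unfold S
  have h1 : List.range' i (a.length + 1 - i)
      = i :: (i+1) :: List.range' (i+2) (a.length - (i+1)) := by
    rw [show a.length + 1 - i = (a.length - (i+1)) + 1 + 1 by omega,
      List.range'_succ, List.range'_succ]
  rw [h1, List.filter_cons, List.filter_cons]
  rw [if_neg (by simp), if_neg (by simp [show ¬ (i + 1 - i > 2) by omega])]

lemma hA (a : List Int) :
    back_i a = (List.range a.length).foldl (fun acc i => acc ++ S a i) [] := by
  unfold back_i
  rw [List.range_succ, List.foldl_append]
  rw [List.foldl_cons, List.foldl_nil]
  rw [A_inner a a.length _ (le_refl _)]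
  have hSn : S a a.length = [] := by
    unfold S
    rw [show a.length + 1 - a.length = 1 by omega]
    rw [show List.range' a.length 1 = [a.length] by simp, List.filter_cons]
    rw [if_neg (by simp [show ¬ (a.length - a.length > 2) by omega])]
    simp
  rw [hSn, List.append_nil]
  apply PySem.List.foldl_congr_mem
  intro acc i hi
  rw [List.mem_range] at hi
  exact A_inner a i acc (by omega)

lemma hB (a : List Int) (hpre : ∀ x ∈ a, 0 ≤ x) :
    back_i_alt a = (List.range a.length).foldl (fun acc i => acc ++ S a i) [] := by
  unfold back_i_alt
  show (List.range a.length).foldl (fun (acc : List (List Int)) (i : Nat) =>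
      extendLoop a.length a ((List.range (a.length - 1)).map (fun k =>
        decide (a.getD k 0 ≤ a.getD (k+1) 0) &&
          !(PySem.Set.inter ((a.map digitsOf).getD k []) ((a.map digitsOf).getD (k+1) [])).isEmpty))
        i (i+1) acc) [] = _
  rw [goodB_eq a hpre]
  apply PySem.List.foldl_congr_mem
  intro acc i hi
  rw [List.mem_range] at hi
  rw [extend_inv a i a.length (i+1) acc (by omega) (by omega) (by omega)
    (by rw [allPb_iff]; intro k hik hkj; omega)]
  rw [S_shift a i hi]

theorem main_eq (a : List Int) (hpre : ∀ x ∈ a, 0 ≤ x) : back_i a = back_i_alt a := by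
  rw [hA a, hB a hpre]

-- ===== VERDICT (by name: the statement is the Claim_ definition above) =====
theorem back_i_spec : Claim_equal_back_i := by
  intro a _ hpre
  unfold Spec_back_i
  exact main_eq a hpre
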